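-- pv_equiv track=rewrite | github.com/allyapasha/-pba2026-ekaallya | run_pipeline.py | normalize_leetspeak
-- ===== SOURCE A (Python) =====
-- LEETSPEAK_MAP = {
--     "0": "o",
--     "1": "i",
--     "2": "z",
--     "3": "e",
--     "4": "a",
--     "5": "s",
--     "6": "g",
--     "7": "t",
--     "8": "b",
--     "9": "g",
--     "@": "a",
-- }
--
-- def normalize_leetspeak(text):
--     """Konversi leetspeak ke huruf biasa"""
--     result = []
--     for i, char in enumerate(text):
--         if char in LEETSPEAK_MAP:
--             prev_is_alpha = i > 0 and text[i - 1].isalpha()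
--             next_is_alpha = i < len(text) - 1 and text[i + 1].isalpha()
--             if prev_is_alpha or next_is_alpha:
--                 result.append(LEETSPEAK_MAP[char])
--             else:
--                 result.append(char)
--         else:
--             result.append(char)
--     return "".join(result)
-- ===== SOURCE B (Python) =====
-- LEETSPEAK_MAP = {
--     "0": "o",
--     "1": "i",
--     "2": "z",
--     "3": "e",
--     "4": "a",
--     "5": "s",
--     "6": "g",
--     "7": "t",
--     "8": "b",
--     "9": "g",
--     "@": "a",
-- }
--
-- def normalize_leetspeak(text):
--     """Konversi leetspeak ke huruf biasa (online state machine, no indexing).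
--
--     A leet char with an alphabetic predecessor is converted immediately;
--     otherwise it is held as 'pending' and decided when the next char arrives
--     (converted iff that char is alphabetic), or emitted unchanged at the end.
--     """
--     out = []
--     pending = None          # a leet char waiting for the next char to decide it
--     prev_alpha = False      # whether the previous original char was alphabetic
--     for c in text:
--         if pending is not None:
--             out.append(LEETSPEAK_MAP[pending] if c.isalpha() else pending)
--             pending = None
--         if c in LEETSPEAK_MAP:
--             if prev_alpha:
--                 out.append(LEETSPEAK_MAP[c])
--             else:
--                 pending = c
--         else:
--             out.append(c)
--         prev_alpha = c.isalpha()
--     if pending is not None: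
--         out.append(pending)
--     return "".join(out)
-- ===== Notes on version B (the rewrite author's own statement) =====
-- stated objective: alternative
-- what changed: B replaces A's random-access neighbour checks (text[i-1]/text[i+1] per index) with an online single-pass state machine that keeps O(1) state - a pending undecided leet char plus a previous-char-alpha flag - deciding each substitution by deferred lookahead with no positional indexing at all.
import Mathlib
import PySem

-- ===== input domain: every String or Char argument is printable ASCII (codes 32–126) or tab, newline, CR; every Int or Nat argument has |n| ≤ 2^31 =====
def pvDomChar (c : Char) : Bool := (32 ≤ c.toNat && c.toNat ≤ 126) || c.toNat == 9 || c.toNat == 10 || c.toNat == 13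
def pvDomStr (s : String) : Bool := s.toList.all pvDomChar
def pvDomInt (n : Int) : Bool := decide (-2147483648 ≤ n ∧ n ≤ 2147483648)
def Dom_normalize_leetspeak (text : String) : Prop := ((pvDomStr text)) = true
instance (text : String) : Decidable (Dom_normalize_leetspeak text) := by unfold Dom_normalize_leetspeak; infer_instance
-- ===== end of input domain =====

-- B replaces A's indexed neighbour checks by an online one-pass state machine with a
-- pending undecided leet char and a previous-char-alpha flag (alternative; return value only).

-- shared constant: the module-level LEETSPEAK_MAP (single-char keys/values, so Char × Char)
def pvLeetMap : PySem.Dict Char Char :=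
  PySem.Dict.ofList [('0','o'),('1','i'),('2','z'),('3','e'),('4','a'),('5','s'),('6','g'),('7','t'),('8','b'),('9','g'),('@','a')]

-- ===== PORT A =====
def normalize_leetspeak (text : String) : String :=
  let cs := text.toList
  let result : List (List Char) :=
    (PySem.List.enumerate cs).foldl (fun acc (ic : Int × Char) =>
      match pvLeetMap.get? ic.2 with
      | some r =>
        let prev_is_alpha := decide (ic.1 > 0) &&
          ((PySem.List.pyGet? cs (ic.1 - 1)).elim false PySem.Chars.isalpha)
        let next_is_alpha := decide (ic.1 < (cs.length : Int) - 1) &&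
          ((PySem.List.pyGet? cs (ic.1 + 1)).elim false PySem.Chars.isalpha)
        if prev_is_alpha || next_is_alpha then acc ++ [[r]] else acc ++ [[ic.2]]
      | none => acc ++ [[ic.2]]) []
  String.ofList (PySem.Chars.join [] result)

-- ===== PORT B =====
-- loop body of Source B: state = (out, pending, prev_alpha)
def pvStepB (st : List Char × Option Char × Bool) (c : Char) : List Char × Option Char × Bool :=
  let out := match st.2.1 with
    | some p => st.1 ++ [if PySem.Chars.isalpha c then (pvLeetMap.get? p).getD p else p]
    | none => st.1
  match pvLeetMap.get? c with
  | some r =>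
      if st.2.2 then (out ++ [r], none, PySem.Chars.isalpha c)
      else (out, some c, PySem.Chars.isalpha c)
  | none => (out ++ [c], none, PySem.Chars.isalpha c)

def normalize_leetspeak_alt (text : String) : String :=
  let st := text.toList.foldl pvStepB ([], none, false)
  String.ofList (st.1 ++ (match st.2.1 with | some p => [p] | none => []))

-- ===== PRECONDITION & SPEC =====
def Spec_normalize_leetspeak (text : String) (out : String) : Prop := out = normalize_leetspeak_alt text
instance (text : String) (out : String) : Decidable (Spec_normalize_leetspeak text out) := by unfold Spec_normalize_leetspeak; infer_instance

-- ===== CLAIM (what is proved, stated in full; the proofs are below) =====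
def Claim_equal_normalize_leetspeak : Prop := ∀ (text : String), Dom_normalize_leetspeak text → Spec_normalize_leetspeak text (normalize_leetspeak text)

-- ===== LEMMAS AND PROOFS =====

-- A's per-character piece, as a function of the (index, char) pair
def pvGA (cs : List Char) (ic : Int × Char) : Char :=
  match pvLeetMap.get? ic.2 with
  | some r =>
    if (decide (ic.1 > 0) && ((PySem.List.pyGet? cs (ic.1 - 1)).elim false PySem.Chars.isalpha)) ||
       (decide (ic.1 < (cs.length : Int) - 1) && ((PySem.List.pyGet? cs (ic.1 + 1)).elim false PySem.Chars.isalpha))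
    then r else ic.2
  | none => ic.2

-- reference recursion: the result on a suffix, given whether the char before it was alphabetic
def pvHeadAlpha : List Char → Bool
  | [] => false
  | c :: _ => PySem.Chars.isalpha c

def pvSpec (pa : Bool) : List Char → List Char
  | [] => []
  | c :: rest =>
    (match pvLeetMap.get? c with
     | some r => if pa || pvHeadAlpha rest then r else c
     | none => c) :: pvSpec (PySem.Chars.isalpha c) rest

def pvPrevA (pa : Bool) (cs : List Char) (i : Nat) : Bool :=
  if i = 0 then pa else (cs[i-1]?).elim false PySem.Chars.isalpha
def pvNextA (cs : List Char) (i : Nat) : Bool :=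
  (cs[i+1]?).elim false PySem.Chars.isalpha
def pvG (p n : Bool) (c : Char) : Char :=
  match pvLeetMap.get? c with
  | some r => if p || n then r else c
  | none => c

lemma pvSpec_length : ∀ (pa : Bool) (cs : List Char), (pvSpec pa cs).length = cs.length := by
  intro pa cs
  induction cs generalizing pa with
  | nil => rfl
  | cons c rest ih => simp [pvSpec, ih]

lemma pvSpec_getElem : ∀ (cs : List Char) (pa : Bool) (i : Nat) (h : i < cs.length),
    (pvSpec pa cs)[i]'(by rw [pvSpec_length]; exact h) =
      pvG (pvPrevA pa cs i) (pvNextA cs i) (cs[i]'h) := by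
  intro cs
  induction cs with
  | nil => intro pa i h; exact absurd h (by simp)
  | cons c rest ih =>
    intro pa i h
    match i with
    | 0 =>
      show (match pvLeetMap.get? c with
            | some r => if pa || pvHeadAlpha rest then r else c
            | none => c) = _
      have hn : pvNextA (c :: rest) 0 = pvHeadAlpha rest := by
        cases rest <;> simp [pvNextA, pvHeadAlpha]
      rw [hn]
      simp [pvPrevA, pvG]
    | j + 1 =>
      have hj : j < rest.length := by simpa using h
      show (pvSpec (PySem.Chars.isalpha c) rest)[j]'_ = _
      refine (ih (PySem.Chars.isalpha c) j hj).trans ?_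
      congr 1
      -- the prev flags agree (the next flags and the char are handled by congr itself)
      all_goals match j with
        | 0 => simp [pvPrevA]
        | k + 1 => simp [pvPrevA]

lemma foldl_push {α β : Type} (f : List β → α → List β) (g : α → β)
    (h : ∀ acc x, f acc x = acc ++ [g x]) :
    ∀ (l : List α) (acc : List β), l.foldl f acc = acc ++ l.map g := by
  intro l
  induction l with
  | nil => simp
  | cons x xs ih => intro acc; simp [List.foldl, h, ih]

lemma normalize_leetspeak_eq_map (text : String) :
    normalize_leetspeak text =
      String.ofList ((PySem.List.enumerate text.toList).map (pvGA text.toList)) := by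
  simp only [normalize_leetspeak]
  rw [foldl_push _ (fun ic => [pvGA text.toList ic])]
  · rw [List.nil_append,
      show ((fun ic => [pvGA text.toList ic]) = (([·]) ∘ pvGA text.toList)) from rfl,
      ← List.map_map, PySem.Chars.join_nil_singletons]
  · intro acc ic
    simp only [pvGA]
    rcases pvLeetMap.get? ic.2 with _ | r <;> simp <;> (try split) <;> simp

-- A's enumerate-map equals the reference recursion with pa = false
lemma pvMap_eq_spec (cs : List Char) :
    (PySem.List.enumerate cs).map (pvGA cs) = pvSpec false cs := by
  apply List.ext_getElem
  · simp [PySem.List.length_enumerate, pvSpec_length]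
  · intro i h1 h2
    have hlen : i < cs.length := by simpa [PySem.List.length_enumerate] using h1
    rw [pvSpec_getElem cs false i hlen]
    simp only [List.getElem_map, PySem.List.getElem_enumerate]
    unfold pvGA pvG
    simp only [Int.zero_add]
    rcases hm : pvLeetMap.get? (cs[i]'hlen) with _ | r
    · rfl
    · simp only []
      have eprev : (decide ((i:Int) > 0) && ((PySem.List.pyGet? cs ((i:Int) - 1)).elim false PySem.Chars.isalpha)) =
          pvPrevA false cs i := by
        by_cases h0 : i = 0
        · subst h0; simp [pvPrevA]
        · have h0' : 0 < i := Nat.pos_of_ne_zero h0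
          have hc : ((i:Int) - 1) = ((i-1 : Nat) : Int) := by omega
          rw [hc, PySem.List.pyGet?_natCast]
          simp [pvPrevA, h0, h0', Int.natCast_pos]
      have enext : (decide ((i:Int) < (cs.length : Int) - 1) && ((PySem.List.pyGet? cs ((i:Int) + 1)).elim false PySem.Chars.isalpha)) =
          pvNextA cs i := by
        by_cases hL : i + 1 < cs.length
        · have hc : ((i:Int) + 1) = ((i+1 : Nat) : Int) := by omega
          rw [hc, PySem.List.pyGet?_natCast]
          simp [pvNextA, show (i:Int) < (cs.length : Int) - 1 by omega]
        · have hnone : cs[i+1]? = none := by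
            rw [List.getElem?_eq_none_iff]; omega
          simp [pvNextA, hnone, show ¬ ((i:Int) < (cs.length : Int) - 1) by omega]
      rw [eprev, enext]

-- B's fold equals the reference recursion
lemma pvFoldB_spec : ∀ (cs : List Char) (out : List Char) (pa : Bool),
    (let st := cs.foldl pvStepB (out, none, pa)
     st.1 ++ (match st.2.1 with | some p => [p] | none => [])) = out ++ pvSpec pa cs := by
  intro cs
  induction cs with
  | nil => intro out pa; simp [pvSpec]
  | cons c rest ih =>
    intro out pa
    show (let st := rest.foldl pvStepB (pvStepB (out, none, pa) c)
          st.1 ++ (match st.2.1 with | some p => [p] | none => [])) = _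
    rcases hm : pvLeetMap.get? c with _ | r
    · have hstep : pvStepB (out, none, pa) c = (out ++ [c], none, PySem.Chars.isalpha c) := by
        simp [pvStepB, hm]
      rw [hstep, ih]
      simp [pvSpec, hm]
    · by_cases hpa : pa = true
      · have hstep : pvStepB (out, none, pa) c = (out ++ [r], none, PySem.Chars.isalpha c) := by
          simp [pvStepB, hm, hpa]
        rw [hstep, ih]
        simp [pvSpec, hm, hpa]
      · have hpa' : pa = false := by
          cases pa; rfl; exact absurd rfl hpa
        subst hpa'
        have hstep : pvStepB (out, none, false) c = (out, some c, PySem.Chars.isalpha c) := by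
          simp [pvStepB, hm]
        rw [hstep]
        cases rest with
        | nil =>
          simp [pvSpec, pvHeadAlpha, hm]
        | cons d rest' =>
          have hstep2 : pvStepB (out, some c, PySem.Chars.isalpha c) d =
              pvStepB (out ++ [if PySem.Chars.isalpha d then r else c], none, PySem.Chars.isalpha c) d := by
            simp [pvStepB, hm]
          show (let st := rest'.foldl pvStepB (pvStepB (out, some c, PySem.Chars.isalpha c) d)
                st.1 ++ (match st.2.1 with | some p => [p] | none => [])) = _
          rw [hstep2]
          have := ih (out ++ [if PySem.Chars.isalpha d then r else c]) (PySem.Chars.isalpha c)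
          rw [show (d :: rest').foldl pvStepB
                (out ++ [if PySem.Chars.isalpha d then r else c], none, PySem.Chars.isalpha c) =
              rest'.foldl pvStepB (pvStepB
                (out ++ [if PySem.Chars.isalpha d then r else c], none, PySem.Chars.isalpha c) d) from rfl] at this
          rw [this]
          simp [pvSpec, pvHeadAlpha, hm]

theorem normalize_leetspeak_spec_aux (text : String) :
    normalize_leetspeak text = normalize_leetspeak_alt text := by
  rw [normalize_leetspeak_eq_map, pvMap_eq_spec]
  show _ = String.ofList _
  rw [pvFoldB_spec text.toList [] false, List.nil_append]

-- ===== VERDICT (by name: the statement is the Claim_ definition above) =====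
theorem normalize_leetspeak_spec : Claim_equal_normalize_leetspeak := by
  intro text _
  exact normalize_leetspeak_spec_aux text
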